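-- pv_equiv track=rewrite | github.com/saikumarysk/m22-ykk | autograders/final_crypto_project/tests/correct.py | encode_to_matrix
-- ===== SOURCE A (Python) =====
-- def encode_to_matrix(message, matrix):
--     """
--     This function encodes a message to a given matrix for encryption when the matrix is read off of. It is a helper
--     function for encrypt_transposition(). Inputs message into matrix left to right by row then top to bottom so that
--     encoded message can be made by reading it off by top to bottom by column then left to right by
--     encrypt_transposition().
--     Input Characters; Left --> Right by row then Top --> Bottom
--     :param message: (str) Message that must be added to matrix.
--     :param matrix: (nested list) Nested list used for matrix.
--     :return: Matrix with message inside it.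
--     """
--     letter_index = 0  # Set up letter index
--     for row_index, row in enumerate(matrix):  # Choose one row at a time to iterate over and add column values to
--         for column_index in range(len(row)):
--             if letter_index == len(message):  # Stop loop once no more letters to add
--                 return matrix
--             letter = message[letter_index]  # Find the given letter to add to the matrix by indexing
--             matrix[row_index][column_index] = letter  # Add given letter to matrix
--             letter_index += 1  # Increment letter_index to go to next letter
--     return matrix
-- ===== SOURCE B (Python) =====
-- def encode_to_matrix(message, matrix):
--     i = 0
--     for row in matrix:
--         chunk = message[i:i + len(row)]
--         row[:len(chunk)] = chunk
--         i += len(chunk)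
--     return matrix
-- ===== Notes on version B (the rewrite author's own statement) =====
-- stated objective: simpler
-- what changed: Replaces A's per-cell counter loop with early return by a single per-row pass that splices the next message slice into each row's prefix; no inner loop, no indexing, no early return.
import Mathlib
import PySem

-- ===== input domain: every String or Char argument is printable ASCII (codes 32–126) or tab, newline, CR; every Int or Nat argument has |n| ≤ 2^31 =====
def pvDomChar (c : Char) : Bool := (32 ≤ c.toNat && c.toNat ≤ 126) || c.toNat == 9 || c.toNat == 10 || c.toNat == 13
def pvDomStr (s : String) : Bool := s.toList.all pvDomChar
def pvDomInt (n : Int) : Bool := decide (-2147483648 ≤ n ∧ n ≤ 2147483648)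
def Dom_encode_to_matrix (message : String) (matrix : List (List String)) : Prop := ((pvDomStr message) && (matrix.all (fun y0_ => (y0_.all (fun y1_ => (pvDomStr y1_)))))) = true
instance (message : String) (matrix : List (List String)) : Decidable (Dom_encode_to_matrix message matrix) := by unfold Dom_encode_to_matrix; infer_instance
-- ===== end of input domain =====

-- B replaces A's per-cell counter loop (with early return) by one per-row pass that
-- splices the next message slice into the row's prefix (objective: simpler).
-- Both Pythons mutate `matrix` in place identically; the equivalence proved here is
-- about the return value.

-- ===== PORT A =====
-- inner loop over one row: returns (updated row, new letter_index, early-return flag)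
def etmRow (msg : List Char) : Nat → List String → List String × Nat × Bool
  | li, [] => ([], li, false)
  | li, c :: rest =>
    if li = msg.length then (c :: rest, li, true)
    else
      let letter := String.ofList [msg.getD li ' ']
      match etmRow msg (li + 1) rest with
      | (r, li', stop) => (letter :: r, li', stop)

-- outer loop over the rows, threading letter_index; early return keeps later rows as-is
def etmRows (msg : List Char) : Nat → List (List String) → List (List String)
  | _, [] => []
  | li, row :: rest =>
    match etmRow msg li row with
    | (r, _, true) => r :: rest
    | (r, li', false) => r :: etmRows msg li' rest

def encode_to_matrix (message : String) (matrix : List (List String)) : List (List String) :=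
  etmRows message.toList 0 matrix

-- ===== PORT B =====
-- one pass over the rows: chunk = message[i:i+len(row)]; row[:len(chunk)] = chunk; i += len(chunk)
def fillRowsB (msg : List Char) : Nat → List (List String) → List (List String)
  | _, [] => []
  | i, row :: rest =>
    let chunk := (msg.drop i).take row.length
    ((chunk.map fun ch => String.ofList [ch]) ++ row.drop chunk.length)
      :: fillRowsB msg (i + chunk.length) rest

def encode_to_matrix_alt (message : String) (matrix : List (List String)) : List (List String) :=
  fillRowsB message.toList 0 matrix

-- ===== PRECONDITION & SPEC =====
def Spec_encode_to_matrix (message : String) (matrix : List (List String)) (out : List (List String)) : Prop := out = encode_to_matrix_alt message matrix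
instance (message : String) (matrix : List (List String)) (out : List (List String)) : Decidable (Spec_encode_to_matrix message matrix out) := by unfold Spec_encode_to_matrix; infer_instance

-- ===== CLAIM (what is proved, stated in full; the proofs are below) =====
def Claim_equal_encode_to_matrix : Prop := ∀ (message : String) (matrix : List (List String)), Dom_encode_to_matrix message matrix → Spec_encode_to_matrix message matrix (encode_to_matrix message matrix)

-- ===== LEMMAS AND PROOFS =====

-- characterisation of A's inner row loop
theorem etmRow_eq (msg : List Char) (row : List String) (li : Nat) (h : li ≤ msg.length) :
    etmRow msg li row =
      (((msg.drop li).take row.length).map (fun ch => String.ofList [ch])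
          ++ row.drop ((msg.drop li).take row.length).length,
       li + ((msg.drop li).take row.length).length,
       decide (msg.length - li < row.length)) := by
  induction row generalizing li with
  | nil => simp [etmRow]
  | cons c rest ih =>
    by_cases hli : li = msg.length
    · subst hli
      simp [etmRow]
    · have hlt : li < msg.length := lt_of_le_of_ne h hli
      have hdropM : (msg.map (fun ch => String.ofList [ch])).drop li
          = String.ofList [msg[li]] :: (msg.map (fun ch => String.ofList [ch])).drop (li + 1) := by
        rw [List.drop_eq_getElem_cons (by simpa using hlt)]
        simp
      have hmin : min (rest.length + 1) (msg.length - li)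
          = min rest.length (msg.length - (li + 1)) + 1 := by omega
      rw [etmRow, if_neg hli, ih (li + 1) hlt]
      simp [hdropM, hmin, List.drop_succ_cons]
      refine ⟨?_, by omega, by omega⟩
      simp [List.getElem?_eq_getElem hlt]

-- B does nothing once the message is exhausted
theorem fillRowsB_exhausted (msg : List Char) (rows : List (List String)) (i : Nat)
    (h : msg.length ≤ i) : fillRowsB msg i rows = rows := by
  induction rows with
  | nil => rfl
  | cons row rest ih =>
    have : msg.drop i = [] := List.drop_eq_nil_of_le h
    simp [fillRowsB, this, ih]

-- main invariant: A's outer loop equals B's pass, for any letter index li ≤ |msg|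
theorem etmRows_eq_fillRowsB (msg : List Char) (rows : List (List String)) (li : Nat)
    (h : li ≤ msg.length) : etmRows msg li rows = fillRowsB msg li rows := by
  induction rows generalizing li with
  | nil => rfl
  | cons row rest ih =>
    have hlen : ((msg.drop li).take row.length).length
        = min row.length (msg.length - li) := by
      simp
    rw [etmRows, etmRow_eq msg row li h, fillRowsB]
    by_cases hstop : msg.length - li < row.length
    · have hchunk : ((msg.drop li).take row.length).length = msg.length - li := by omega
      simp only [hstop, decide_true]
      rw [fillRowsB_exhausted msg rest (li + ((msg.drop li).take row.length).length)
        (by omega)]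
    · simp only [hstop, decide_false]
      rw [ih (li + ((msg.drop li).take row.length).length) (by omega)]

-- ===== VERDICT (by name: the statement is the Claim_ definition above) =====
theorem encode_to_matrix_spec : Claim_equal_encode_to_matrix := by
  intro message matrix _
  unfold Spec_encode_to_matrix encode_to_matrix encode_to_matrix_alt
  exact etmRows_eq_fillRowsB message.toList matrix 0 (Nat.zero_le _)
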